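-- pv_equiv track=rewrite | github.com/nirajanDevHub108/PythonDSA | STACK/maxPeople.py | maxPeople
-- ===== SOURCE A (Python) =====
-- def previousGreater(arr):
--     n = len(arr)
--     prev = [-1] * n
--     st = []
--
--     for i in range(n):
--         while st and arr[st[-1]] < arr[i]:
--             st.pop()
--         if st:
--             prev[i] = st[-1]
--         st.append(i)
--
--     return prev
--
-- def nextGreater(arr):
--     n = len(arr)
--     next_ = [n] * n
--     st = []
--
--     for i in range(n - 1, -1, -1):
--         while st and arr[st[-1]] < arr[i]:
--             st.pop()
--         if st:
--             next_[i] = st[-1]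
--         st.append(i)
--
--     return next_
--
-- def maxPeople(arr):
--     n = len(arr)
--
--     # Compute Previous Greater and Next Greater
--     prev = previousGreater(arr)
--     next_ = nextGreater(arr)
--
--     maxCount = 0
--
--     for i in range(n):
--         leftBound = 0 if prev[i] == -1 else prev[i] + 1
--         rightBound = n - 1 if next_[i] == n else next_[i] - 1
--
--         # Range size gives how many people visible including self
--         count = rightBound - leftBound + 1
--
--         maxCount = max(maxCount, count)
--
--     return maxCount
-- ===== SOURCE B (Python) =====
-- def maxPeople(arr):
--     # Stack-free alternative: for each person, expand the visible range
--     # directly to the left and right past strictly shorter people.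
--     n = len(arr)
--     best = 0
--     for i in range(n):
--         l = i
--         while l > 0 and arr[l - 1] < arr[i]:
--             l -= 1
--         r = i
--         while r < n - 1 and arr[r + 1] < arr[i]:
--             r += 1
--         best = max(best, r - l + 1)
--     return best
-- ===== Notes on version B (the rewrite author's own statement) =====
-- stated objective: simpler
-- what changed: Replaces the two monotonic-stack passes (previous/next greater arrays) by a single loop that, for each person, directly expands the visible range left and right past strictly shorter people.
import Mathlib
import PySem

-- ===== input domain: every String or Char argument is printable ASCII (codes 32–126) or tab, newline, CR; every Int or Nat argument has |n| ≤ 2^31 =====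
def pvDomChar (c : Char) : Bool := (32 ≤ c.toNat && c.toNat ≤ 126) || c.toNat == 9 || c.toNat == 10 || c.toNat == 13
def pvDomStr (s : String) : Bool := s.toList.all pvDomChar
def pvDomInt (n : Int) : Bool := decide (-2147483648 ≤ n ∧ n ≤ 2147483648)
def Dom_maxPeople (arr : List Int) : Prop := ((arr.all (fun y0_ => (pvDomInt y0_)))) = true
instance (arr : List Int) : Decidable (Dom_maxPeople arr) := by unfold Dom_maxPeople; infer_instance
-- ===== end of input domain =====

-- B replaces A's two monotonic-stack passes by a direct left/right expansion per index (simpler, not faster).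

-- ===== PORT A =====
-- list read arr[j]; every access in both ports has 0 ≤ j < len, so getD's default is unreachable (exact)
def pvGet (xs : List Int) (j : Nat) : Int := xs.getD j 0

-- the `while st and arr[st[-1]] < arr[i]: st.pop()` loop (stack kept top-first)
def pvPopL (arr : List Int) (i : Nat) (st : List Nat) : List Nat :=
  match st with
  | [] => []
  | t :: rest => if pvGet arr t < pvGet arr i then pvPopL arr i rest else t :: rest

-- shared body of the two stack loops (`if st: res[i] = st[-1]` then `st.append(i)`)
def pgBody (arr : List Int) (s : List Int × List Nat) (i : Nat) : List Int × List Nat :=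
  let st := pvPopL arr i s.2
  (match st with
   | [] => s.1
   | t :: _ => s.1.set i (Int.ofNat t), i :: st)

def previousGreater (arr : List Int) : List Int :=
  ((List.range arr.length).foldl (pgBody arr) (List.replicate arr.length (-1), [])).1

def nextGreater (arr : List Int) : List Int :=
  (((List.range arr.length).reverse).foldl (pgBody arr)
    (List.replicate arr.length (arr.length : Int), [])).1

def maxPeople (arr : List Int) : Int :=
  let n := arr.length
  let prev := previousGreater arr
  let next_ := nextGreater arr
  (List.range n).foldl (fun maxCount i =>
    let leftBound : Int := if pvGet prev i = -1 then 0 else pvGet prev i + 1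
    let rightBound : Int := if pvGet next_ i = (n : Int) then (n : Int) - 1 else pvGet next_ i - 1
    max maxCount (rightBound - leftBound + 1)) 0

-- ===== PORT B =====
-- `while l > 0 and arr[l-1] < arr[i]: l -= 1`
def expandL (arr : List Int) (x : Int) : Nat → Nat
  | 0 => 0
  | l + 1 => if pvGet arr l < x then expandL arr x l else l + 1

-- `while r < n-1 and arr[r+1] < arr[i]: r += 1`
def expandR (arr : List Int) (x : Int) (r : Nat) : Nat :=
  if h : r + 1 < arr.length ∧ pvGet arr (r + 1) < x then expandR arr x (r + 1) else r
termination_by arr.length - r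
decreasing_by omega

def maxPeople_alt (arr : List Int) : Int :=
  (List.range arr.length).foldl (fun best i =>
    let l := expandL arr (pvGet arr i) i
    let r := expandR arr (pvGet arr i) i
    max best ((r : Int) - (l : Int) + 1)) 0

-- ===== PRECONDITION & SPEC =====
def Spec_maxPeople (arr : List Int) (out : Int) : Prop := out = maxPeople_alt arr
instance (arr : List Int) (out : Int) : Decidable (Spec_maxPeople arr out) := by unfold Spec_maxPeople; infer_instance

-- ===== CLAIM (what is proved, stated in full; the proofs are below) =====
def Claim_equal_maxPeople : Prop := ∀ (arr : List Int), Dom_maxPeople arr → Spec_maxPeople arr (maxPeople arr)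

-- ===== LEMMAS AND PROOFS =====

-- pvPopL is a dropWhile
theorem popL_eq_dropWhile (arr : List Int) (i : Nat) (st : List Nat) :
    pvPopL arr i st = st.dropWhile (fun t => decide (pvGet arr t < pvGet arr i)) := by
  induction st with
  | nil => rfl
  | cons t rest ih =>
    simp only [pvPopL, List.dropWhile_cons]
    by_cases h : pvGet arr t < pvGet arr i <;> simp [h, ih]

-- forward stack after processing indices 0..i-1
def stkF (arr : List Int) : Nat → List Nat
  | 0 => []
  | i + 1 => i :: pvPopL arr i (stkF arr i)

-- backward stack after processing indices n-1 down to t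
def stkB (arr : List Int) (t : Nat) : List Nat :=
  if h : t < arr.length then t :: pvPopL arr t (stkB arr (t + 1)) else []
termination_by arr.length - t
decreasing_by omega

-- value A writes into prev[i] / next_[i] at step i
def pA (arr : List Int) (i : Nat) : Int :=
  match (pvPopL arr i (stkF arr i)).head? with
  | none => -1
  | some t => (t : Int)

def nA (arr : List Int) (i : Nat) : Int :=
  match (pvPopL arr i (stkB arr (i + 1))).head? with
  | none => (arr.length : Int)
  | some t => (t : Int)

theorem mem_of_mem_dropWhile {α : Type} (p : α → Bool) (l : List α) {a : α}
    (h : a ∈ l.dropWhile p) : a ∈ l :=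
  (List.dropWhile_sublist p (l := l)).mem h

theorem mem_dropWhile_of_not_pred {α : Type} (p : α → Bool) (l : List α) {a : α}
    (hm : a ∈ l) (hp : p a = false) : a ∈ l.dropWhile p := by
  induction l with
  | nil => cases hm
  | cons b t ih =>
    rw [List.dropWhile_cons]
    by_cases hb : p b = true
    · simp only [hb, if_true]
      rcases List.mem_cons.mp hm with rfl | hmt
      · rw [hb] at hp; cases hp
      · exact ih hmt
    · simp only [hb]
      exact hm

theorem head_pred_false_of_dropWhile {α : Type} (p : α → Bool) (l : List α) {a : α} {t : List α}
    (h : l.dropWhile p = a :: t) : p a = false := by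
  induction l with
  | nil => cases h
  | cons b r ih =>
    rw [List.dropWhile_cons] at h
    by_cases hb : p b = true
    · simp only [hb, if_true] at h; exact ih h
    · simp only [hb] at h
      cases h; simpa using hb

theorem dropWhile_head_of {R : Nat → Nat → Prop} (p : Nat → Bool) :
    ∀ (l : List Nat) (j : Nat), l.Pairwise R → j ∈ l → p j = false →
    (∀ a ∈ l, R a j → p a = true) → (l.dropWhile p).head? = some j := by
  intro l
  induction l with
  | nil => intro j _ hj; cases hj
  | cons a t ih =>
    intro j hpw hj hpj habove
    rw [List.dropWhile_cons]
    rcases List.mem_cons.mp hj with rfl | hjt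
    · simp [hpj]
    · have haj : R a j := (List.pairwise_cons.mp hpw).1 j hjt
      have hpa : p a = true := habove a (List.mem_cons_self) haj
      simp only [hpa, if_true]
      exact ih j (List.pairwise_cons.mp hpw).2 hjt hpj
        (fun b hb hr => habove b (List.mem_cons_of_mem a hb) hr)

-- (B0) forward stack members are below i
theorem stkF_lt (arr : List Int) : ∀ (i : Nat), ∀ j ∈ stkF arr i, j < i := by
  intro i
  induction i with
  | zero => intro j hj; cases hj
  | succ i ih =>
    intro j hj
    rcases List.mem_cons.mp hj with rfl | hjt
    · omega
    · have : j ∈ stkF arr i := by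
        rw [popL_eq_dropWhile] at hjt
        exact mem_of_mem_dropWhile _ _ hjt
      exact Nat.lt_succ_of_lt (ih j this)

-- (S2) forward stack is strictly decreasing (top first)
theorem stkF_sorted (arr : List Int) : ∀ (i : Nat), (stkF arr i).Pairwise (· > ·) := by
  intro i
  induction i with
  | zero => exact List.Pairwise.nil
  | succ i ih =>
    refine List.pairwise_cons.mpr ⟨?_, ?_⟩
    · intro j hj
      rw [popL_eq_dropWhile] at hj
      exact stkF_lt arr i j (mem_of_mem_dropWhile _ _ hj)
    · rw [popL_eq_dropWhile]
      exact List.Pairwise.sublist (List.dropWhile_sublist _) ih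

-- (S3) along the stack (top first) the heights are non-decreasing
theorem stkF_mono (arr : List Int) :
    ∀ (i : Nat), (stkF arr i).Pairwise (fun a b => pvGet arr a ≤ pvGet arr b) := by
  intro i
  induction i with
  | zero => exact List.Pairwise.nil
  | succ i ih =>
    have htail : (pvPopL arr i (stkF arr i)).Pairwise (fun a b => pvGet arr a ≤ pvGet arr b) := by
      rw [popL_eq_dropWhile]; exact List.Pairwise.sublist (List.dropWhile_sublist _) ih
    refine List.pairwise_cons.mpr ⟨?_, htail⟩
    intro j hj
    rcases hrest : pvPopL arr i (stkF arr i) with _ | ⟨h0, rt⟩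
    · rw [hrest] at hj; cases hj
    · have hh0 : ¬ pvGet arr h0 < pvGet arr i := by
        rw [popL_eq_dropWhile] at hrest
        have := head_pred_false_of_dropWhile _ _ hrest
        simpa using this
      rw [hrest] at hj htail
      rcases List.mem_cons.mp hj with rfl | hjr
      · omega
      · have : pvGet arr h0 ≤ pvGet arr j := (List.pairwise_cons.mp htail).1 j hjr
        omega

-- every survivor of the pop at step i is at least as tall as arr[i]
theorem popL_ge (arr : List Int) (i : Nat) :
    ∀ j ∈ pvPopL arr i (stkF arr i), pvGet arr i ≤ pvGet arr j := by
  intro j hj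
  rcases hrest : pvPopL arr i (stkF arr i) with _ | ⟨h0, rt⟩
  · rw [hrest] at hj; cases hj
  · have hh0 : ¬ pvGet arr h0 < pvGet arr i := by
      rw [popL_eq_dropWhile] at hrest
      have := head_pred_false_of_dropWhile _ _ hrest
      simpa using this
    have htail : (pvPopL arr i (stkF arr i)).Pairwise (fun a b => pvGet arr a ≤ pvGet arr b) := by
      rw [popL_eq_dropWhile]
      exact List.Pairwise.sublist (List.dropWhile_sublist _) (stkF_mono arr i)
    rw [hrest] at hj htail
    rcases List.mem_cons.mp hj with rfl | hjr
    · omega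
    · have : pvGet arr h0 ≤ pvGet arr j := (List.pairwise_cons.mp htail).1 j hjr
      omega

-- (S1) membership characterisation of the forward stack
theorem mem_stkF (arr : List Int) :
    ∀ (i : Nat) (j : Nat), j ∈ stkF arr i ↔
      j < i ∧ ∀ l, j < l → l < i → pvGet arr l ≤ pvGet arr j := by
  intro i
  induction i with
  | zero => intro j; simp [stkF]
  | succ i ih =>
    intro j
    constructor
    · intro hj
      rcases List.mem_cons.mp hj with rfl | hjt
      · exact ⟨Nat.lt_succ_self j, fun l h1 h2 => absurd (Nat.lt_trans h1 h2) (by omega)⟩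
      · have hgi : pvGet arr i ≤ pvGet arr j := popL_ge arr i j hjt
        have hmem : j ∈ stkF arr i := by
          rw [popL_eq_dropWhile] at hjt
          exact mem_of_mem_dropWhile _ _ hjt
        obtain ⟨hlt, hprop⟩ := (ih j).mp hmem
        refine ⟨Nat.lt_succ_of_lt hlt, fun l h1 h2 => ?_⟩
        rcases Nat.lt_succ_iff_lt_or_eq.mp h2 with h2' | rfl
        · exact hprop l h1 h2'
        · exact hgi
    · rintro ⟨hlt, hprop⟩
      rcases Nat.lt_succ_iff_lt_or_eq.mp hlt with hlt' | rfl
      · have hmem : j ∈ stkF arr i :=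
          (ih j).mpr ⟨hlt', fun l h1 h2 => hprop l h1 (Nat.lt_succ_of_lt h2)⟩
        have hsurv : pvGet arr i ≤ pvGet arr j := hprop i hlt' (Nat.lt_succ_self i)
        refine List.mem_cons_of_mem i ?_
        rw [popL_eq_dropWhile]
        refine mem_dropWhile_of_not_pred _ _ hmem ?_
        simp; omega
      · exact List.mem_cons_self

-- (S4a) nobody at least as tall to the left: the pop empties the stack
theorem popL_empty (arr : List Int) (i : Nat)
    (h : ∀ j, j < i → pvGet arr j < pvGet arr i) : pvPopL arr i (stkF arr i) = [] := by
  rw [popL_eq_dropWhile]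
  rw [List.dropWhile_eq_nil_iff]
  intro x hx
  have := stkF_lt arr i x hx
  simp [h x this]

-- (S4b) the nearest ≥ neighbour on the left is the survivor head
theorem popL_head (arr : List Int) (i j0 : Nat)
    (h1 : j0 < i) (h2 : pvGet arr i ≤ pvGet arr j0)
    (h3 : ∀ l, j0 < l → l < i → pvGet arr l < pvGet arr i) :
    (pvPopL arr i (stkF arr i)).head? = some j0 := by
  rw [popL_eq_dropWhile]
  refine dropWhile_head_of (R := (· > ·)) _ (stkF arr i) j0 (stkF_sorted arr i) ?_ ?_ ?_
  · exact (mem_stkF arr i j0).mpr ⟨h1, fun l hl1 hl2 => le_of_lt (lt_of_lt_of_le (h3 l hl1 hl2) h2)⟩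
  · simp; omega
  · intro a ha hgt
    have halt : a < i := stkF_lt arr i a ha
    simp [h3 a hgt halt]

-- ===== mirrored lemmas for the backward stack =====

theorem stkB_of_ge (arr : List Int) (t : Nat) (h : arr.length ≤ t) : stkB arr t = [] := by
  rw [stkB]; simp [Nat.not_lt_of_le h]

theorem stkB_of_lt (arr : List Int) (t : Nat) (h : t < arr.length) :
    stkB arr t = t :: pvPopL arr t (stkB arr (t + 1)) := by
  rw [stkB]; simp [h]

theorem stkB_range (arr : List Int) :
    ∀ (k t : Nat), arr.length - t ≤ k → ∀ j ∈ stkB arr t, t ≤ j ∧ j < arr.length := by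
  intro k
  induction k with
  | zero =>
    intro t ht j hj
    rw [stkB_of_ge arr t (by omega)] at hj; cases hj
  | succ k ih =>
    intro t ht j hj
    by_cases h : t < arr.length
    · rw [stkB_of_lt arr t h] at hj
      rcases List.mem_cons.mp hj with rfl | hjt
      · exact ⟨le_refl _, h⟩
      · have : j ∈ stkB arr (t + 1) := by
          rw [popL_eq_dropWhile] at hjt
          exact mem_of_mem_dropWhile _ _ hjt
        have := ih (t + 1) (by omega) j this
        omega
    · rw [stkB_of_ge arr t (by omega)] at hj; cases hj

theorem stkB_sorted (arr : List Int) :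
    ∀ (k t : Nat), arr.length - t ≤ k → (stkB arr t).Pairwise (· < ·) := by
  intro k
  induction k with
  | zero =>
    intro t ht
    rw [stkB_of_ge arr t (by omega)]; exact List.Pairwise.nil
  | succ k ih =>
    intro t ht
    by_cases h : t < arr.length
    · rw [stkB_of_lt arr t h]
      refine List.pairwise_cons.mpr ⟨?_, ?_⟩
      · intro j hj
        rw [popL_eq_dropWhile] at hj
        have := stkB_range arr k (t + 1) (by omega) j (mem_of_mem_dropWhile _ _ hj)
        omega
      · rw [popL_eq_dropWhile]
        exact List.Pairwise.sublist (List.dropWhile_sublist _) (ih (t + 1) (by omega))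
    · rw [stkB_of_ge arr t (by omega)]; exact List.Pairwise.nil

theorem stkB_mono (arr : List Int) :
    ∀ (k t : Nat), arr.length - t ≤ k →
      (stkB arr t).Pairwise (fun a b => pvGet arr a ≤ pvGet arr b) := by
  intro k
  induction k with
  | zero =>
    intro t ht
    rw [stkB_of_ge arr t (by omega)]; exact List.Pairwise.nil
  | succ k ih =>
    intro t ht
    by_cases h : t < arr.length
    · rw [stkB_of_lt arr t h]
      have htail : (pvPopL arr t (stkB arr (t + 1))).Pairwise
          (fun a b => pvGet arr a ≤ pvGet arr b) := by
        rw [popL_eq_dropWhile]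
        exact List.Pairwise.sublist (List.dropWhile_sublist _) (ih (t + 1) (by omega))
      refine List.pairwise_cons.mpr ⟨?_, htail⟩
      intro j hj
      rcases hrest : pvPopL arr t (stkB arr (t + 1)) with _ | ⟨h0, rt⟩
      · rw [hrest] at hj; cases hj
      · have hh0 : ¬ pvGet arr h0 < pvGet arr t := by
          rw [popL_eq_dropWhile] at hrest
          have := head_pred_false_of_dropWhile _ _ hrest
          simpa using this
        rw [hrest] at hj htail
        rcases List.mem_cons.mp hj with rfl | hjr
        · omega
        · have : pvGet arr h0 ≤ pvGet arr j := (List.pairwise_cons.mp htail).1 j hjr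
          omega
    · rw [stkB_of_ge arr t (by omega)]; exact List.Pairwise.nil

theorem popB_ge (arr : List Int) (i : Nat) :
    ∀ j ∈ pvPopL arr i (stkB arr (i + 1)), pvGet arr i ≤ pvGet arr j := by
  intro j hj
  rcases hrest : pvPopL arr i (stkB arr (i + 1)) with _ | ⟨h0, rt⟩
  · rw [hrest] at hj; cases hj
  · have hh0 : ¬ pvGet arr h0 < pvGet arr i := by
      rw [popL_eq_dropWhile] at hrest
      have := head_pred_false_of_dropWhile _ _ hrest
      simpa using this
    have htail : (pvPopL arr i (stkB arr (i + 1))).Pairwise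
        (fun a b => pvGet arr a ≤ pvGet arr b) := by
      rw [popL_eq_dropWhile]
      exact List.Pairwise.sublist (List.dropWhile_sublist _) (stkB_mono arr (arr.length - (i + 1)) (i + 1) (le_refl _))
    rw [hrest] at hj htail
    rcases List.mem_cons.mp hj with rfl | hjr
    · omega
    · have : pvGet arr h0 ≤ pvGet arr j := (List.pairwise_cons.mp htail).1 j hjr
      omega

theorem mem_stkB (arr : List Int) :
    ∀ (k t : Nat), arr.length - t ≤ k → ∀ (j : Nat), (j ∈ stkB arr t ↔
      t ≤ j ∧ j < arr.length ∧ ∀ l, t ≤ l → l < j → pvGet arr l ≤ pvGet arr j) := by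
  intro k
  induction k with
  | zero =>
    intro t ht j
    rw [stkB_of_ge arr t (by omega)]
    simp only [List.not_mem_nil, false_iff, not_and]
    intro h1 h2
    omega
  | succ k ih =>
    intro t ht j
    by_cases h : t < arr.length
    · rw [stkB_of_lt arr t h]
      constructor
      · intro hj
        rcases List.mem_cons.mp hj with rfl | hjt
        · exact ⟨le_refl _, h, fun l h1 h2 => absurd (Nat.lt_of_le_of_lt h1 h2) (by omega)⟩
        · have hgi : pvGet arr t ≤ pvGet arr j := popB_ge arr t j hjt
          have hmem : j ∈ stkB arr (t + 1) := by
            rw [popL_eq_dropWhile] at hjt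
            exact mem_of_mem_dropWhile _ _ hjt
          obtain ⟨hge, hlt, hprop⟩ := (ih (t + 1) (by omega) j).mp hmem
          refine ⟨by omega, hlt, fun l h1 h2 => ?_⟩
          rcases Nat.lt_or_ge t l with h1' | h1'
          · exact hprop l h1' h2
          · have : l = t := by omega
            subst this; exact hgi
      · rintro ⟨hge, hlt, hprop⟩
        rcases Nat.lt_or_ge t j with hgt | hle
        · have hmem : j ∈ stkB arr (t + 1) :=
            (ih (t + 1) (by omega) j).mpr ⟨by omega, hlt, fun l h1 h2 => hprop l (by omega) h2⟩
          have hsurv : pvGet arr t ≤ pvGet arr j := hprop t (le_refl _) hgt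
          refine List.mem_cons_of_mem t ?_
          rw [popL_eq_dropWhile]
          refine mem_dropWhile_of_not_pred _ _ hmem ?_
          simp; omega
        · have : j = t := by omega
          subst this; exact List.mem_cons_self
    · rw [stkB_of_ge arr t (by omega)]
      simp only [List.not_mem_nil, false_iff, not_and]
      intro h1 h2
      omega

theorem popB_empty (arr : List Int) (i : Nat)
    (h : ∀ j, i < j → j < arr.length → pvGet arr j < pvGet arr i) :
    pvPopL arr i (stkB arr (i + 1)) = [] := by
  rw [popL_eq_dropWhile]
  rw [List.dropWhile_eq_nil_iff]
  intro x hx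
  have := stkB_range arr (arr.length - (i + 1)) (i + 1) (le_refl _) x hx
  simp [h x (by omega) this.2]

theorem popB_head (arr : List Int) (i j1 : Nat)
    (h1 : i < j1) (h1' : j1 < arr.length) (h2 : pvGet arr i ≤ pvGet arr j1)
    (h3 : ∀ l, i < l → l < j1 → pvGet arr l < pvGet arr i) :
    (pvPopL arr i (stkB arr (i + 1))).head? = some j1 := by
  rw [popL_eq_dropWhile]
  refine dropWhile_head_of (R := (· < ·)) _ (stkB arr (i + 1)) j1
    (stkB_sorted arr (arr.length - (i + 1)) (i + 1) (le_refl _)) ?_ ?_ ?_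
  · refine (mem_stkB arr (arr.length - (i + 1)) (i + 1) (le_refl _) j1).mpr
      ⟨by omega, h1', fun l hl1 hl2 => le_of_lt (lt_of_lt_of_le (h3 l (by omega) hl2) h2)⟩
  · simp; omega
  · intro a ha hlt
    have := stkB_range arr (arr.length - (i + 1)) (i + 1) (le_refl _) a ha
    simp [h3 a (by omega) hlt]

-- ===== fold invariants: the ports compute pA / nA =====

theorem fwd_fold (arr : List Int) :
    ∀ (k : Nat), k ≤ arr.length →
      (let s := (List.range k).foldl (pgBody arr) (List.replicate arr.length (-1), []);
       s.2 = stkF arr k ∧ s.1.length = arr.length ∧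
       ∀ i, i < arr.length → s.1.getD i 0 = if i < k then pA arr i else -1) := by
  intro k
  induction k with
  | zero =>
    intro _
    refine ⟨rfl, List.length_replicate, fun i hi => ?_⟩
    simp [List.getD_eq_getElem?_getD, hi]
  | succ k ih =>
    intro hk
    obtain ⟨hst, hlen, hent⟩ := ih (by omega)
    rw [List.range_succ, List.foldl_append]
    simp only [List.foldl_cons, List.foldl_nil]
    set s := (List.range k).foldl (pgBody arr) (List.replicate arr.length (-1), []) with hs
    unfold pgBody
    rw [hst]
    rcases hpop : pvPopL arr k (stkF arr k) with _ | ⟨t, rt⟩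
    · refine ⟨by simp [stkF, hpop], by simpa using hlen, fun i hi => ?_⟩
      simp only []
      rw [hent i hi]
      by_cases hik : i < k
      · rw [if_pos hik, if_pos (by omega)]
      · by_cases hik' : i = k
        · subst hik'
          rw [if_neg (by omega), if_pos (by omega)]
          simp [pA, hpop]
        · rw [if_neg hik, if_neg (by omega)]
    · refine ⟨by simp [stkF, hpop], by simpa using hlen, fun i hi => ?_⟩
      simp only []
      by_cases hik' : i = k
      · subst hik'
        rw [List.getD_eq_getElem?_getD, List.getElem?_set_self (by omega)]
        rw [if_pos (by omega)]
        simp [pA, hpop]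
      · rw [List.getD_eq_getElem?_getD, List.getElem?_set_ne (by omega)]
        rw [← List.getD_eq_getElem?_getD, hent i hi]
        by_cases hik : i < k
        · rw [if_pos hik, if_pos (by omega)]
        · rw [if_neg hik, if_neg (by omega)]

theorem prevGreater_entry (arr : List Int) (i : Nat) (hi : i < arr.length) :
    pvGet (previousGreater arr) i = pA arr i := by
  obtain ⟨_, hlen, hent⟩ := fwd_fold arr arr.length (le_refl _)
  unfold previousGreater pvGet
  rw [hent i hi]
  simp [hi]

theorem bwd_fold (arr : List Int) :
    ∀ (t : Nat), t ≤ arr.length → ∀ (q : List Int), q.length = arr.length →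
      (∀ i, i < arr.length → q.getD i 0 = if t ≤ i then nA arr i else (arr.length : Int)) →
      (let s := ((List.range t).reverse).foldl (pgBody arr) (q, stkB arr t);
       s.1.length = arr.length ∧ ∀ i, i < arr.length → s.1.getD i 0 = nA arr i) := by
  intro t
  induction t with
  | zero =>
    intro _ q hqlen hq
    refine ⟨by simpa using hqlen, fun i hi => ?_⟩
    simpa using (hq i hi).trans (by simp)
  | succ t ih =>
    intro ht q hqlen hq
    have hrev : (List.range (t + 1)).reverse = t :: (List.range t).reverse := by
      rw [List.range_succ]; simp
    rw [hrev]
    simp only [List.foldl_cons]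
    have hstep : pgBody arr (q, stkB arr (t + 1)) t =
        (match pvPopL arr t (stkB arr (t + 1)) with
         | [] => q
         | u :: _ => q.set t (Int.ofNat u), stkB arr t) := by
      unfold pgBody
      rw [stkB_of_lt arr t (by omega)]
    rcases hpop : pvPopL arr t (stkB arr (t + 1)) with _ | ⟨u, ru⟩
    · have : pgBody arr (q, stkB arr (t + 1)) t = (q, stkB arr t) := by rw [hstep, hpop]
      rw [this]
      refine ih (by omega) q hqlen (fun i hi => ?_)
      rw [hq i hi]
      by_cases hit : t + 1 ≤ i
      · rw [if_pos hit, if_pos (by omega)]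
      · by_cases hit' : i = t
        · subst hit'
          rw [if_neg (by omega), if_pos (le_refl _)]
          simp [nA, hpop]
        · rw [if_neg hit, if_neg (by omega)]
    · have : pgBody arr (q, stkB arr (t + 1)) t = (q.set t (Int.ofNat u), stkB arr t) := by
        rw [hstep, hpop]
      rw [this]
      refine ih (by omega) _ (by simpa using hqlen) (fun i hi => ?_)
      by_cases hit' : i = t
      · subst hit'
        rw [List.getD_eq_getElem?_getD, List.getElem?_set_self (by omega)]
        rw [if_pos (le_refl _)]
        simp [nA, hpop]
      · rw [List.getD_eq_getElem?_getD, List.getElem?_set_ne (by omega)]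
        rw [← List.getD_eq_getElem?_getD, hq i hi]
        by_cases hit : t + 1 ≤ i
        · rw [if_pos hit, if_pos (by omega)]
        · rw [if_neg hit, if_neg (by omega)]
  -- note: the init stack at call t is stkB arr t, and at the top call stkB arr n = []

theorem nextGreater_entry (arr : List Int) (i : Nat) (hi : i < arr.length) :
    pvGet (nextGreater arr) i = nA arr i := by
  have h0 : stkB arr arr.length = [] := stkB_of_ge arr arr.length (le_refl _)
  have := bwd_fold arr arr.length (le_refl _) (List.replicate arr.length (arr.length : Int))
    (List.length_replicate)
    (fun j hj => by simp [List.getD_eq_getElem?_getD, hj, Nat.not_le_of_lt hj])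
  obtain ⟨hlen, hent⟩ := by
    rw [h0] at this
    exact this
  unfold nextGreater pvGet
  rw [hent i hi]

-- ===== expansion characterisations =====

theorem expandL_all (arr : List Int) (x : Int) :
    ∀ (i : Nat), (∀ j, j < i → pvGet arr j < x) → expandL arr x i = 0 := by
  intro i
  induction i with
  | zero => intro _; rfl
  | succ i ih =>
    intro h
    simp only [expandL, h i (Nat.lt_succ_self i), if_true]
    exact ih (fun j hj => h j (Nat.lt_succ_of_lt hj))

theorem expandL_stop (arr : List Int) (x : Int) :
    ∀ (i j0 : Nat), j0 < i → x ≤ pvGet arr j0 →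
      (∀ l, j0 < l → l < i → pvGet arr l < x) → expandL arr x i = j0 + 1 := by
  intro i
  induction i with
  | zero => intro j0 h; omega
  | succ i ih =>
    intro j0 h1 h2 h3
    by_cases hij : j0 = i
    · subst hij
      simp only [expandL]
      rw [if_neg (by omega)]
    · have hlt : pvGet arr i < x := h3 i (by omega) (Nat.lt_succ_self i)
      simp only [expandL, hlt, if_true]
      exact ih j0 (by omega) h2 (fun l hl1 hl2 => h3 l hl1 (Nat.lt_succ_of_lt hl2))

theorem expandR_all (arr : List Int) (x : Int) :
    ∀ (k i : Nat), arr.length - i ≤ k → i < arr.length →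
      (∀ j, i < j → j < arr.length → pvGet arr j < x) → expandR arr x i = arr.length - 1 := by
  intro k
  induction k with
  | zero => intro i hk hi; omega
  | succ k ih =>
    intro i hk hi h
    by_cases hnext : i + 1 < arr.length
    · rw [expandR, dif_pos ⟨hnext, h (i + 1) (Nat.lt_succ_self i) hnext⟩]
      exact ih (i + 1) (by omega) hnext (fun j h1 h2 => h j (by omega) h2)
    · rw [expandR, dif_neg (by omega)]
      omega

theorem expandR_stop (arr : List Int) (x : Int) :
    ∀ (k i j1 : Nat), j1 - i ≤ k → i < j1 → j1 < arr.length → x ≤ pvGet arr j1 →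
      (∀ l, i < l → l < j1 → pvGet arr l < x) → expandR arr x i = j1 - 1 := by
  intro k
  induction k with
  | zero => intro i j1 hk h1; omega
  | succ k ih =>
    intro i j1 hk h1 h2 h3 h4
    by_cases hij : i + 1 = j1
    · rw [expandR, dif_neg (by rw [hij]; omega)]
      omega
    · have hlt : pvGet arr (i + 1) < x := h4 (i + 1) (Nat.lt_succ_self i) (by omega)
      rw [expandR, dif_pos ⟨by omega, hlt⟩]
      exact ih (i + 1) j1 (by omega) (by omega) h2 h3 (fun l hl1 hl2 => h4 l (by omega) hl2)

-- ===== the per-index bound equalities =====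

theorem leftBound_eq (arr : List Int) (i : Nat) (hi : i < arr.length) :
    (if pvGet (previousGreater arr) i = -1 then 0 else pvGet (previousGreater arr) i + 1) =
      ((expandL arr (pvGet arr i) i : Nat) : Int) := by
  rw [prevGreater_entry arr i hi]
  by_cases h : ∃ j, j < i ∧ pvGet arr i ≤ pvGet arr j
  · obtain ⟨j, hj⟩ := h
    have hex : ∃ j0, (j0 < i ∧ pvGet arr i ≤ pvGet arr j0) ∧
        ∀ l, j0 < l → l < i → pvGet arr l < pvGet arr i := by
      have hfg := Nat.findGreatest_spec
        (P := fun j => j < i ∧ pvGet arr i ≤ pvGet arr j) (le_of_lt hj.1) hj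
      refine ⟨Nat.findGreatest (fun j => j < i ∧ pvGet arr i ≤ pvGet arr j) i, hfg, ?_⟩
      intro l h1 h2
      by_contra hc
      have hc' : pvGet arr i ≤ pvGet arr l := by omega
      have hle := Nat.le_findGreatest
        (P := fun j => j < i ∧ pvGet arr i ≤ pvGet arr j) (le_of_lt h2) ⟨h2, hc'⟩
      omega
    obtain ⟨j0, hspec, hbetween⟩ := hex
    have hhead := popL_head arr i j0 hspec.1 hspec.2 hbetween
    have hE := expandL_stop arr (pvGet arr i) i j0 hspec.1 hspec.2 hbetween
    rw [hE]
    unfold pA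
    rw [hhead]
    simp
  · have hall : ∀ j, j < i → pvGet arr j < pvGet arr i := by
      intro j hj
      by_contra hc
      exact h ⟨j, hj, by omega⟩
    have hpop := popL_empty arr i hall
    have hE := expandL_all arr (pvGet arr i) i hall
    rw [hE]
    unfold pA
    rw [hpop]
    simp

theorem rightBound_eq (arr : List Int) (i : Nat) (hi : i < arr.length) :
    (if pvGet (nextGreater arr) i = (arr.length : Int) then (arr.length : Int) - 1
     else pvGet (nextGreater arr) i - 1) =
      ((expandR arr (pvGet arr i) i : Nat) : Int) := by
  rw [nextGreater_entry arr i hi]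
  by_cases h : ∃ j, i < j ∧ j < arr.length ∧ pvGet arr i ≤ pvGet arr j
  · have hex : ∃ j1, (i < j1 ∧ j1 < arr.length ∧ pvGet arr i ≤ pvGet arr j1) ∧
        ∀ l, l < j1 → ¬ (i < l ∧ l < arr.length ∧ pvGet arr i ≤ pvGet arr l) :=
      ⟨Nat.find h, Nat.find_spec h, fun l hl => Nat.find_min h hl⟩
    obtain ⟨j1, hspec, hmin⟩ := hex
    have hbetween : ∀ l, i < l → l < j1 → pvGet arr l < pvGet arr i := by
      intro l h1 h2
      by_contra hc
      exact hmin l h2 ⟨h1, by omega, by omega⟩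
    have hhead := popB_head arr i j1 hspec.1 hspec.2.1 hspec.2.2 hbetween
    have hE := expandR_stop arr (pvGet arr i) (j1 - i) i j1 (le_refl _) hspec.1 hspec.2.1
      hspec.2.2 hbetween
    rw [hE]
    unfold nA
    rw [hhead]
    have hne : ((j1 : Nat) : Int) ≠ (arr.length : Int) := by
      have := hspec.2.1; omega
    simp only [hne, if_false]
    have h1j : 1 ≤ j1 := by omega
    omega
  · have hall : ∀ j, i < j → j < arr.length → pvGet arr j < pvGet arr i := by
      intro j h1 h2
      by_contra hc
      exact h ⟨j, h1, h2, by omega⟩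
    have hpop := popB_empty arr i hall
    have hE := expandR_all arr (pvGet arr i) (arr.length - i) i (le_refl _) hi hall
    rw [hE]
    unfold nA
    rw [hpop]
    simp
    omega

-- ===== VERDICT (by name: the statement is the Claim_ definition above) =====
theorem maxPeople_spec : Claim_equal_maxPeople := by
  intro arr _
  unfold Spec_maxPeople maxPeople maxPeople_alt
  simp only []
  refine PySem.List.foldl_congr_mem _ _ _ _ ?_
  intro acc i hmem
  have hi : i < arr.length := List.mem_range.mp hmem
  rw [leftBound_eq arr i hi, rightBound_eq arr i hi]
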